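-- pv_equiv track=rewrite | github.com/radoslawrolka/Introduction_to_Computer_Science_Course | Zestaw_4/z17_d.py | zad17
-- ===== SOURCE A (Python) =====
-- def zad17(tab):
--     n = len(tab)
--     maks_suma = 0
--     kolumna = 0
--     wiersz = 0
--     for i in range(n):  # pion
--         for j in range(n):  # poziom
--             suma = 0
--             if i - 1 >= 0:
--                 suma += tab[i - 1][j]  # gora
--                 if j - 1 >= 0:
--                     suma += tab[i - 1][j - 1]  # gora-lewo
--                 if j + 1 <= n - 1:
--                     suma += tab[i - 1][j + 1]  # gora-prawo
--             if i + 1 <= n - 1: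
--                 suma += tab[i + 1][j]  # dol
--                 if j - 1 >= 0:
--                     suma += tab[i + 1][j - 1]  # dol-lewo
--                 if j + 1 <= n - 1:
--                     suma += tab[i + 1][j + 1]  # dol-prawo
--             if j - 1 >= 0:
--                 suma += tab[i][j - 1]  # lewo
--             if j + 1 <= n-1:
--                 suma += tab[i][j + 1]  # prawo
--             if maks_suma < suma:
--                 maks_suma = suma
--                 kolumna = j
--                 wiersz = i
--     return maks_suma, "kolumna", kolumna, "wiersz", wiersz
-- ===== SOURCE B (Python) =====
-- # Scatter instead of gather: each cell's value is added into a fresh sums table at its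
-- # 8 in-bounds neighbour positions, then a row-major scan (strict-> update, 0 init)
-- # picks the same first maximum. Alternative decomposition, same O(n^2) cost.
-- DELTAS = [(-1, -1), (-1, 0), (-1, 1), (0, -1), (0, 1), (1, -1), (1, 0), (1, 1)]
--
-- def zad17(tab):
--     n = len(tab)
--     sums = {}
--     for i in range(n):
--         for j in range(n):
--             v = tab[i][j]
--             for di, dj in DELTAS:
--                 x = i + di
--                 y = j + dj
--                 if 0 <= x < n and 0 <= y < n:
--                     sums[(x, y)] = sums.get((x, y), 0) + v
--     maks_suma = 0
--     kolumna = 0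
--     wiersz = 0
--     for i in range(n):
--         for j in range(n):
--             s = sums.get((i, j), 0)
--             if maks_suma < s:
--                 maks_suma = s
--                 kolumna = j
--                 wiersz = i
--     return maks_suma, "kolumna", kolumna, "wiersz", wiersz
-- ===== Notes on version B (the rewrite author's own statement) =====
-- stated objective: alternative
-- what changed: Replaces A's per-cell gather (eight unrolled boundary branches summing a cell's neighbours inside the max loop) by a two-phase scatter: each cell's value is first added into a fresh sums table at its 8 in-bounds neighbour positions, and a separate row-major scan with the same 0-initialised strict-update then selects the first maximum.
-- outside the precondition, e.g. on zad17([[]]): A returns (0, 'kolumna', 0, 'wiersz', 0), B raises IndexError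
import Mathlib
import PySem

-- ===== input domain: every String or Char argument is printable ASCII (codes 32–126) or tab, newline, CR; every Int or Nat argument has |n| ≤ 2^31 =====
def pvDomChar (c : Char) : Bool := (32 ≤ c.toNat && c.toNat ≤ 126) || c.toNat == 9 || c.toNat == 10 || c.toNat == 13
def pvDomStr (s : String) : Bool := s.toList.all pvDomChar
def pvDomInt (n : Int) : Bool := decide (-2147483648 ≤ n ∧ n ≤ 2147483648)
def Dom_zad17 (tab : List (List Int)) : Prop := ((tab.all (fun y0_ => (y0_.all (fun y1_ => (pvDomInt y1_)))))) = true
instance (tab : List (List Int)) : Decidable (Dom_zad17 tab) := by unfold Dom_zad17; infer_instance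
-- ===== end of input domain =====

-- B replaces A's per-cell gather (eight boundary branches inside the max loop) by a
-- two-phase scatter: add each cell's value into a sums table at its 8 in-bounds
-- neighbours, then scan row-major with the same 0-initialised strict max update.

-- ===== PORT A =====
-- the body of A's inner loop, factored as a helper (tab[x][y] with guard-ensured in-range
-- indices ported as pyGetD; exact on Pre_, where every index read is in bounds)
def zad17_suma (tab : List (List Int)) (n i j : Int) : Int :=
  let g : Int → Int → Int := fun x y => PySem.List.pyGetD (PySem.List.pyGetD tab x []) y 0
  let suma : Int := 0
  let suma := if 0 ≤ i - 1 then
      let suma := suma + g (i-1) j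
      let suma := if 0 ≤ j - 1 then suma + g (i-1) (j-1) else suma
      if j + 1 ≤ n - 1 then suma + g (i-1) (j+1) else suma
    else suma
  let suma := if i + 1 ≤ n - 1 then
      let suma := suma + g (i+1) j
      let suma := if 0 ≤ j - 1 then suma + g (i+1) (j-1) else suma
      if j + 1 ≤ n - 1 then suma + g (i+1) (j+1) else suma
    else suma
  let suma := if 0 ≤ j - 1 then suma + g i (j-1) else suma
  if j + 1 ≤ n - 1 then suma + g i (j+1) else suma

def zad17 (tab : List (List Int)) : Int × String × Int × String × Int :=
  let n : Int := PySem.List.len tab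
  let st := (PySem.List.pyRange 0 n 1).foldl (fun st i =>
    (PySem.List.pyRange 0 n 1).foldl (fun st j =>
      let suma := zad17_suma tab n i j
      if st.1 < suma then (suma, j, i) else st) st) ((0:Int), (0:Int), (0:Int))
  (st.1, "kolumna", st.2.1, "wiersz", st.2.2)

-- ===== PORT B =====
def zad17_deltas : List (Int × Int) :=
  [(-1, -1), (-1, 0), (-1, 1), (0, -1), (0, 1), (1, -1), (1, 0), (1, 1)]

def zad17_alt (tab : List (List Int)) : Int × String × Int × String × Int :=
  let n : Int := PySem.List.len tab
  -- phase 1: scatter each cell's value into sums at its in-bounds neighbours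
  let sums : PySem.Dict (Int × Int) Int :=
    (PySem.List.pyRange 0 n 1).foldl (fun d i =>
      (PySem.List.pyRange 0 n 1).foldl (fun d j =>
        let v := PySem.List.pyGetD (PySem.List.pyGetD tab i []) j 0
        zad17_deltas.foldl (fun d p =>
          if 0 ≤ i + p.1 ∧ i + p.1 < n ∧ 0 ≤ j + p.2 ∧ j + p.2 < n then
            d.insert (i + p.1, j + p.2) (d.getD (i + p.1, j + p.2) 0 + v)
          else d) d) d) PySem.Dict.empty
  -- phase 2: row-major scan, strict update from 0
  let st := (PySem.List.pyRange 0 n 1).foldl (fun st i =>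
    (PySem.List.pyRange 0 n 1).foldl (fun st j =>
      let s := sums.getD (i, j) 0
      if st.1 < s then (s, j, i) else st) st) ((0:Int), (0:Int), (0:Int))
  (st.1, "kolumna", st.2.1, "wiersz", st.2.2)

-- ===== PRECONDITION & SPEC =====
-- Pre_ excludes exactly the ragged inputs (some row shorter than the number of rows):
-- on those the Pythons raise IndexError (A on every such input except the degenerate
-- single-short-row case [[…]] it never indexes, where A returns the zero tuple and B,
-- which reads every cell, raises). The equivalence proof itself does not need Pre_
-- (both ports read via pyGetD and agree everywhere); Pre_ only delimits where the
-- ports are faithful to their Pythons.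
def Pre_zad17 (tab : List (List Int)) : Prop := ∀ r ∈ tab, tab.length ≤ r.length
instance (tab : List (List Int)) : Decidable (Pre_zad17 tab) := by unfold Pre_zad17; infer_instance
def pvWitness_zad17 : List (List Int) := [[1, 2], [3, 4]]

def Spec_zad17 (tab : List (List Int)) (out : Int × String × Int × String × Int) : Prop := out = zad17_alt tab
instance (tab : List (List Int)) (out : Int × String × Int × String × Int) : Decidable (Spec_zad17 tab out) := by unfold Spec_zad17; infer_instance

-- ===== CLAIM (what is proved, stated in full; the proofs are below) =====
def Claim_equal_zad17 : Prop := ∀ (tab : List (List Int)), Dom_zad17 tab → Pre_zad17 tab → Spec_zad17 tab (zad17 tab)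

-- ===== LEMMAS AND PROOFS =====

lemma pv_getD_scatter_step {α : Type} (key : α → Int × Int) (w : α → Int) (cond : α → Prop)
    [DecidablePred cond] (k : Int × Int) :
    ∀ (L : List α) (d : PySem.Dict (Int × Int) Int),
      (L.foldl (fun d a => if cond a then d.insert (key a) (d.getD (key a) 0 + w a) else d) d).getD k 0
      = d.getD k 0 + ((L.filter (fun a => decide (cond a) && (key a == k))).map w).sum := by
  intro L
  induction L with
  | nil => intro d; simp
  | cons x t ih =>
      intro d
      simp only [List.foldl_cons, List.filter_cons]
      by_cases hc : cond x
      · rw [if_pos hc, ih]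
        by_cases hk : key x = k
        · simp [hc, hk, PySem.Dict.getD_insert]
          ring
        · have hb : (key x == k) = false := by simp [hk]
          simp only [hc, decide_true, hb, Bool.and_false, PySem.Dict.getD_insert]
          rw [if_neg (fun h => hk h.symm)]
          simp
      · rw [if_neg hc, ih]
        simp [hc]

lemma pv_getD_foldl_acc {α : Type} (k : Int × Int)
    (F : PySem.Dict (Int × Int) Int → α → PySem.Dict (Int × Int) Int) (c : α → Int)
    (h : ∀ d x, (F d x).getD k 0 = d.getD k 0 + c x) :
    ∀ (L : List α) (d : PySem.Dict (Int × Int) Int),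
      (L.foldl F d).getD k 0 = d.getD k 0 + (L.map c).sum := by
  intro L
  induction L with
  | nil => intro d; simp
  | cons x t ih => intro d; simp only [List.foldl_cons, List.map_cons, List.sum_cons]; rw [ih, h]; ring

lemma pv_sum_filter_map {α : Type} (q : α → Bool) (w : α → Int) :
    ∀ L : List α, ((L.filter q).map w).sum = (L.map (fun a => if q a then w a else 0)).sum := by
  intro L
  induction L with
  | nil => rfl
  | cons x t ih => by_cases h : q x <;> simp [List.filter_cons, h, ih]

lemma pv_indicator_sum (c : Int) (f : Int → Int) :
    ∀ (l : List Int), l.Nodup → (l.map (fun x => if x = c then f x else 0)).sum = if c ∈ l then f c else 0 := by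
  intro l
  induction l with
  | nil => intro _; simp
  | cons x t ih =>
      intro hl
      obtain ⟨hx, ht⟩ := List.nodup_cons.mp hl
      simp only [List.map_cons, List.sum_cons]
      by_cases h : x = c
      · subst h
        rw [if_pos rfl]
        have hz : (t.map (fun y => if y = x then f y else 0)).sum = 0 := by
          apply List.sum_eq_zero
          intro y hy
          obtain ⟨z, hz, rfl⟩ := List.mem_map.mp hy
          rw [if_neg (fun (he : z = x) => hx (he ▸ hz))]
        simp [hz]
      · rw [if_neg h, ih ht]
        have hm : (c ∈ x :: t) ↔ (c ∈ t) := by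
          constructor
          · intro h'
            rcases List.mem_cons.mp h' with he | h''
            · exact absurd he.symm h
            · exact h''
          · exact fun h'' => List.mem_cons_of_mem _ h''
        simp only [hm, zero_add]

lemma pv_double_indicator (n a' b' : Int) (f : Int → Int → Int) :
    ((PySem.List.pyRange 0 n 1).map (fun i =>
      ((PySem.List.pyRange 0 n 1).map (fun j => if i = a' ∧ j = b' then f i j else 0)).sum)).sum
    = if 0 ≤ a' ∧ a' < n ∧ 0 ≤ b' ∧ b' < n then f a' b' else 0 := by
  have hin : ∀ i : Int, ((PySem.List.pyRange 0 n 1).map (fun j => if i = a' ∧ j = b' then f i j else 0)).sum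
      = if i = a' then (if 0 ≤ b' ∧ b' < n then f i b' else 0) else 0 := by
    intro i
    by_cases hi : i = a'
    · subst hi
      rw [if_pos rfl]
      have h1 := pv_indicator_sum b' (fun j => f i j) (PySem.List.pyRange 0 n 1) (PySem.List.nodup_pyRange_one 0 n)
      simp only [true_and]
      rw [h1]
      simp only [PySem.List.mem_pyRange_one]
    · rw [if_neg hi]
      apply List.sum_eq_zero
      intro y hy
      obtain ⟨z, _, rfl⟩ := List.mem_map.mp hy
      rw [if_neg (fun he => hi he.1)]
  simp only [hin]
  have h2 := pv_indicator_sum a' (fun i => if 0 ≤ b' ∧ b' < n then f i b' else 0)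
      (PySem.List.pyRange 0 n 1) (PySem.List.nodup_pyRange_one 0 n)
  rw [h2]
  simp only [PySem.List.mem_pyRange_one]
  by_cases ha : 0 ≤ a' ∧ a' < n <;> by_cases hb : 0 ≤ b' ∧ b' < n <;> simp_all <;> omega

-- one delta's double range sum collapses to a single guarded cell read
lemma pv_T_eval (n a b d1 d2 : Int) (f : Int → Int → Int)
    (ha0 : 0 ≤ a) (han : a < n) (hb0 : 0 ≤ b) (hbn : b < n) :
    ((PySem.List.pyRange 0 n 1).map (fun i => ((PySem.List.pyRange 0 n 1).map (fun j =>
        if (0 ≤ i + d1 ∧ i + d1 < n ∧ 0 ≤ j + d2 ∧ j + d2 < n) ∧ (i + d1, j + d2) = (a, b)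
        then f i j else 0)).sum)).sum
    = if 0 ≤ a - d1 ∧ a - d1 < n ∧ 0 ≤ b - d2 ∧ b - d2 < n then f (a - d1) (b - d2) else 0 := by
  have hcond : ∀ i j : Int,
      ((0 ≤ i + d1 ∧ i + d1 < n ∧ 0 ≤ j + d2 ∧ j + d2 < n) ∧ (i + d1, j + d2) = (a, b))
      ↔ (i = a - d1 ∧ j = b - d2) := by
    intro i j
    rw [Prod.mk.injEq]
    omega
  simp only [hcond]
  rw [pv_double_indicator n (a - d1) (b - d2) f]

-- per-cell contribution of cell (i, j) to key k in the scatter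
def pvC (tab : List (List Int)) (n : Int) (k : Int × Int) (i j : Int) : Int :=
  ((zad17_deltas.filter (fun p =>
      decide (0 ≤ i + p.1 ∧ i + p.1 < n ∧ 0 ≤ j + p.2 ∧ j + p.2 < n)
        && ((i + p.1, j + p.2) == k))).map (fun _ => PySem.List.pyGetD (PySem.List.pyGetD tab i []) j 0)).sum

lemma pvC_expand (tab : List (List Int)) (n : Int) (k : Int × Int) (i j : Int) :
    pvC tab n k i j = (zad17_deltas.map (fun p =>
      if (0 ≤ i + p.1 ∧ i + p.1 < n ∧ 0 ≤ j + p.2 ∧ j + p.2 < n) ∧ (i + p.1, j + p.2) = k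
      then PySem.List.pyGetD (PySem.List.pyGetD tab i []) j 0 else 0)).sum := by
  rw [pvC, pv_sum_filter_map]
  simp only [Bool.and_eq_true, decide_eq_true_eq, beq_iff_eq]

set_option maxHeartbeats 2000000 in
lemma pv_cell_eq (tab : List (List Int)) (n a b : Int)
    (ha0 : 0 ≤ a) (han : a < n) (hb0 : 0 ≤ b) (hbn : b < n) :
    ((PySem.List.pyRange 0 n 1).map (fun i =>
      ((PySem.List.pyRange 0 n 1).map (fun j => pvC tab n (a, b) i j)).sum)).sum
    = zad17_suma tab n a b := by
  simp only [pvC_expand, zad17_deltas, List.map_cons, List.map_nil, List.sum_cons, List.sum_nil,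
    PySem.List.sum_map_add_int]
  rw [pv_T_eval n a b (-1) (-1) _ ha0 han hb0 hbn,
      pv_T_eval n a b (-1) 0 _ ha0 han hb0 hbn,
      pv_T_eval n a b (-1) 1 _ ha0 han hb0 hbn,
      pv_T_eval n a b 0 (-1) _ ha0 han hb0 hbn,
      pv_T_eval n a b 0 1 _ ha0 han hb0 hbn,
      pv_T_eval n a b 1 (-1) _ ha0 han hb0 hbn,
      pv_T_eval n a b 1 0 _ ha0 han hb0 hbn,
      pv_T_eval n a b 1 1 _ ha0 han hb0 hbn]
  have hz0 : ∀ l : List Int, (l.map (fun _ => (0 : Int))).sum = 0 := fun l => by simp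
  simp only [hz0, add_zero, sub_neg_eq_add, sub_zero]
  have hc1 : (0 ≤ a + 1 ∧ a + 1 < n ∧ 0 ≤ b + 1 ∧ b + 1 < n) ↔ (a + 1 ≤ n - 1 ∧ b + 1 ≤ n - 1) := by omega
  have hc2 : (0 ≤ a + 1 ∧ a + 1 < n ∧ 0 ≤ b ∧ b < n) ↔ (a + 1 ≤ n - 1) := by omega
  have hc3 : (0 ≤ a + 1 ∧ a + 1 < n ∧ 0 ≤ b - 1 ∧ b - 1 < n) ↔ (a + 1 ≤ n - 1 ∧ 0 ≤ b - 1) := by omega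
  have hc4 : (0 ≤ a ∧ a < n ∧ 0 ≤ b + 1 ∧ b + 1 < n) ↔ (b + 1 ≤ n - 1) := by omega
  have hc5 : (0 ≤ a ∧ a < n ∧ 0 ≤ b - 1 ∧ b - 1 < n) ↔ (0 ≤ b - 1) := by omega
  have hc6 : (0 ≤ a - 1 ∧ a - 1 < n ∧ 0 ≤ b + 1 ∧ b + 1 < n) ↔ (0 ≤ a - 1 ∧ b + 1 ≤ n - 1) := by omega
  have hc7 : (0 ≤ a - 1 ∧ a - 1 < n ∧ 0 ≤ b ∧ b < n) ↔ (0 ≤ a - 1) := by omega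
  have hc8 : (0 ≤ a - 1 ∧ a - 1 < n ∧ 0 ≤ b - 1 ∧ b - 1 < n) ↔ (0 ≤ a - 1 ∧ 0 ≤ b - 1) := by omega
  simp only [hc1, hc2, hc3, hc4, hc5, hc6, hc7, hc8, zad17_suma]
  by_cases h1 : 0 ≤ a - 1 <;> by_cases h2 : a + 1 ≤ n - 1 <;>
    by_cases h3 : 0 ≤ b - 1 <;> by_cases h4 : b + 1 ≤ n - 1 <;>
    simp only [h1, h2, h3, h4, if_true, if_false, and_true, and_false, true_and, false_and,
      and_self, iff_true, iff_false] <;>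
    simp [h1, h2, h3, h4] <;> ring

-- the scatter dict's value at k is the double range sum of per-cell contributions
lemma pv_scatter_getD (tab : List (List Int)) (n : Int) (k : Int × Int) :
    ((PySem.List.pyRange 0 n 1).foldl (fun d i =>
      (PySem.List.pyRange 0 n 1).foldl (fun d j =>
        zad17_deltas.foldl (fun d p =>
          if 0 ≤ i + p.1 ∧ i + p.1 < n ∧ 0 ≤ j + p.2 ∧ j + p.2 < n then
            d.insert (i + p.1, j + p.2)
              (d.getD (i + p.1, j + p.2) 0 + PySem.List.pyGetD (PySem.List.pyGetD tab i []) j 0)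
          else d) d) d) (PySem.Dict.empty : PySem.Dict (Int × Int) Int)).getD k 0
    = ((PySem.List.pyRange 0 n 1).map (fun i =>
        ((PySem.List.pyRange 0 n 1).map (fun j => pvC tab n k i j)).sum)).sum := by
  rw [pv_getD_foldl_acc k _ (fun i => ((PySem.List.pyRange 0 n 1).map (fun j => pvC tab n k i j)).sum)
      (fun d i => pv_getD_foldl_acc k _ (fun j => pvC tab n k i j)
        (fun d j => pv_getD_scatter_step (fun p => (i + p.1, j + p.2))
          (fun _ => PySem.List.pyGetD (PySem.List.pyGetD tab i []) j 0)
          (fun p => 0 ≤ i + p.1 ∧ i + p.1 < n ∧ 0 ≤ j + p.2 ∧ j + p.2 < n) k zad17_deltas d)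
        (PySem.List.pyRange 0 n 1) d)
      (PySem.List.pyRange 0 n 1) PySem.Dict.empty]
  simp

-- ===== VERDICT (by name: the statement is the Claim_ definition above) =====
theorem zad17_spec : Claim_equal_zad17 := by
  intro tab _ _
  show zad17 tab = zad17_alt tab
  simp only [zad17, zad17_alt]
  have hfold : (PySem.List.pyRange 0 (PySem.List.len tab) 1).foldl (fun st i =>
      (PySem.List.pyRange 0 (PySem.List.len tab) 1).foldl (fun st j =>
        let suma := zad17_suma tab (PySem.List.len tab) i j
        if st.1 < suma then (suma, j, i) else st) st) (((0:Int), (0:Int), (0:Int)) : Int × Int × Int)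
    = (PySem.List.pyRange 0 (PySem.List.len tab) 1).foldl (fun st i =>
      (PySem.List.pyRange 0 (PySem.List.len tab) 1).foldl (fun st j =>
        let s := ((PySem.List.pyRange 0 (PySem.List.len tab) 1).foldl (fun d i =>
          (PySem.List.pyRange 0 (PySem.List.len tab) 1).foldl (fun d j =>
            zad17_deltas.foldl (fun d p =>
              if 0 ≤ i + p.1 ∧ i + p.1 < PySem.List.len tab ∧ 0 ≤ j + p.2 ∧ j + p.2 < PySem.List.len tab then
                d.insert (i + p.1, j + p.2)
                  (d.getD (i + p.1, j + p.2) 0 + PySem.List.pyGetD (PySem.List.pyGetD tab i []) j 0)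
              else d) d) d) (PySem.Dict.empty : PySem.Dict (Int × Int) Int)).getD (i, j) 0
        if st.1 < s then (s, j, i) else st) st) (((0:Int), (0:Int), (0:Int)) : Int × Int × Int) := by
    apply PySem.List.foldl_congr_mem
    intro acc i hi
    apply PySem.List.foldl_congr_mem
    intro acc2 j hj
    obtain ⟨hi0, hin⟩ := PySem.List.mem_pyRange_one.mp hi
    obtain ⟨hj0, hjn⟩ := PySem.List.mem_pyRange_one.mp hj
    simp only [pv_scatter_getD tab (PySem.List.len tab) (i, j),
      pv_cell_eq tab (PySem.List.len tab) i j hi0 hin hj0 hjn]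
  rw [hfold]
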